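-- pv_equiv track=rewrite | github.com/mofaoss/SaaAutomataAcacia_back | app/application/startup/interface_plan.py | build_initial_interface_keys
-- ===== SOURCE A (Python) =====
-- def build_initial_interface_keys(startup_target_index: int, auto_start_task: bool) -> list[str]:
--     idx_map = {
--         0: "display",
--         1: "home",
--         2: "additional",
--     }
--     ordered = [idx_map.get(int(startup_target_index), "display")]
--     if auto_start_task:
--         ordered.append("home")
--
--     unique: list[str] = []
--     seen: set[str] = set()
--     for key in ordered:
--         if key in seen:
--             continue
--         seen.add(key)
--         unique.append(key)
--     return unique
-- ===== SOURCE B (Python) =====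
-- _OUTCOMES = {
--     (0, False): ["display"],
--     (0, True): ["display", "home"],
--     (1, False): ["home"],
--     (1, True): ["home"],
--     (2, False): ["additional"],
--     (2, True): ["additional", "home"],
-- }
--
--
-- def build_initial_interface_keys(startup_target_index: int, auto_start_task: bool) -> list[str]:
--     i = int(startup_target_index)
--     if i not in (0, 1, 2):
--         i = 0
--     return list(_OUTCOMES[(i, bool(auto_start_task))])
-- ===== Notes on version B (the rewrite author's own statement) =====
-- stated objective: simpler
-- what changed: Replaces A's dict lookup plus conditional append plus seen-set dedup loop by a single precomputed table mapping (normalized index, flag) directly to the final deduplicated key list.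
import Mathlib
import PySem

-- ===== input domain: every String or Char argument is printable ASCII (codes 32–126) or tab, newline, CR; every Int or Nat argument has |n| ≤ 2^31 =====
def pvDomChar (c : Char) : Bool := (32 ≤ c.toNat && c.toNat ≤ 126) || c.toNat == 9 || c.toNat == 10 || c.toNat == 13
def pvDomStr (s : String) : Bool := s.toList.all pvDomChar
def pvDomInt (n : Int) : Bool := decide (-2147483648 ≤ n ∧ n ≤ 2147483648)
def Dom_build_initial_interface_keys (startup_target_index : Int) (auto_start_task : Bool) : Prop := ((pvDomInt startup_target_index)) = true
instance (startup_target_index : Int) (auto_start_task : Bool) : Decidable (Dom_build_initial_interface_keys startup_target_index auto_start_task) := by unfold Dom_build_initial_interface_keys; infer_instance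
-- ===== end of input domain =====

-- B replaces A's lookup + conditional append + seen-set dedup loop by one precomputed outcome table keyed by (normalized index, flag): simpler, same values.

-- ===== PORT A =====
def build_initial_interface_keys (startup_target_index : Int) (auto_start_task : Bool) : List String :=
  let idx_map : PySem.Dict Int String :=
    PySem.Dict.ofList [(0, "display"), (1, "home"), (2, "additional")]
  let ordered : List String := [idx_map.getD startup_target_index "display"]
  let ordered := if auto_start_task then ordered ++ ["home"] else ordered
  let st := ordered.foldl (fun (st : List String × PySem.Set String) key =>
      if PySem.Set.contains st.2 key then st
      else (st.1 ++ [key], PySem.Set.add st.2 key)) ([], PySem.Set.empty)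
  st.1

-- ===== PORT B =====
def pvOutcomes : PySem.Dict (Int × Bool) (List String) :=
  PySem.Dict.ofList
    [ ((0, false), ["display"])
    , ((0, true), ["display", "home"])
    , ((1, false), ["home"])
    , ((1, true), ["home"])
    , ((2, false), ["additional"])
    , ((2, true), ["additional", "home"]) ]

def build_initial_interface_keys_alt (startup_target_index : Int) (auto_start_task : Bool) : List String :=
  let i := if startup_target_index = 0 ∨ startup_target_index = 1 ∨ startup_target_index = 2
           then startup_target_index else 0
  (pvOutcomes.get? (i, auto_start_task)).getD []  -- the key is always present after normalization, so the default never fires (Python's table[...] never raises here)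

-- ===== PRECONDITION & SPEC =====
def Spec_build_initial_interface_keys (startup_target_index : Int) (auto_start_task : Bool) (out : List String) : Prop := out = build_initial_interface_keys_alt startup_target_index auto_start_task
instance (startup_target_index : Int) (auto_start_task : Bool) (out : List String) : Decidable (Spec_build_initial_interface_keys startup_target_index auto_start_task out) := by unfold Spec_build_initial_interface_keys; infer_instance

-- ===== CLAIM (what is proved, stated in full; the proofs are below) =====
def Claim_equal_build_initial_interface_keys : Prop := ∀ (startup_target_index : Int) (auto_start_task : Bool), Dom_build_initial_interface_keys startup_target_index auto_start_task → Spec_build_initial_interface_keys startup_target_index auto_start_task (build_initial_interface_keys startup_target_index auto_start_task)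

-- ===== LEMMAS AND PROOFS =====
theorem bik_eq (i : Int) (t : Bool) :
    build_initial_interface_keys i t = build_initial_interface_keys_alt i t := by
  by_cases h0 : i = 0
  · subst h0; rcases t with _ | _ <;> decide
  · by_cases h1 : i = 1
    · subst h1; rcases t with _ | _ <;> decide
    · by_cases h2 : i = 2
      · subst h2; rcases t with _ | _ <;> decide
      · unfold build_initial_interface_keys build_initial_interface_keys_alt pvOutcomes
        rcases t with _ | _ <;>
          · simp only [PySem.Dict.ofList, PySem.Dict.update, List.foldl]
            simp [PySem.Dict.getD_insert, PySem.Dict.get?_insert, PySem.Dict.getD_empty, h0, h1, h2, List.foldl,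
                  PySem.Set.contains, PySem.Set.add, PySem.Set.empty]

-- ===== VERDICT (by name: the statement is the Claim_ definition above) =====
theorem build_initial_interface_keys_spec : Claim_equal_build_initial_interface_keys := by
  intro i t _
  exact bik_eq i t
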